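-- pv_equiv track=rewrite | github.com/guico33/w40k-explorer | src/scraper/url_collector.py | _is_valid_article_link
-- ===== SOURCE A (Python) =====
-- def _is_valid_article_link(href: str) -> bool:
--     """Check if a link is a valid article link.
--
--     Args:
--         href: The href attribute value
--
--     Returns:
--         True if it's a valid article link
--     """
--     if not href:
--         return False
--
--     # Must be a wiki link
--     if not href.startswith("/wiki/"):
--         return False
--
--     # Skip special pages, talk pages, etc.
--     skip_patterns = [
--         "/wiki/Special:",
--         "/wiki/File:",
--         "/wiki/Category:",
--         "/wiki/Template:",
--         "/wiki/Help:",
--         "/wiki/User:",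
--         "/wiki/Talk:",
--         "/wiki/MediaWiki:",
--     ]
--
--     for pattern in skip_patterns:
--         if href.startswith(pattern):
--             return False
--
--     return True
-- ===== SOURCE B (Python) =====
-- _SKIP = {"Special", "File", "Category", "Template", "Help", "User", "Talk", "MediaWiki"}
--
--
-- def _is_valid_article_link(href: str) -> bool:
--     """Check if a link is a valid article link (namespace-set formulation)."""
--     if not href.startswith("/wiki/"):
--         return False
--     rest = href[len("/wiki/"):]
--     i = rest.find(":")
--     if i == -1:
--         return True
--     return rest[:i] not in _SKIP
-- ===== Notes on version B (the rewrite author's own statement) =====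
-- stated objective: idiomatic
-- what changed: Replaces the loop testing the href against eight namespace-prefixed skip patterns by extracting the namespace token before the first colon of the part after the wiki prefix and testing it for membership in a set of skipped namespaces.
import Mathlib
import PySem

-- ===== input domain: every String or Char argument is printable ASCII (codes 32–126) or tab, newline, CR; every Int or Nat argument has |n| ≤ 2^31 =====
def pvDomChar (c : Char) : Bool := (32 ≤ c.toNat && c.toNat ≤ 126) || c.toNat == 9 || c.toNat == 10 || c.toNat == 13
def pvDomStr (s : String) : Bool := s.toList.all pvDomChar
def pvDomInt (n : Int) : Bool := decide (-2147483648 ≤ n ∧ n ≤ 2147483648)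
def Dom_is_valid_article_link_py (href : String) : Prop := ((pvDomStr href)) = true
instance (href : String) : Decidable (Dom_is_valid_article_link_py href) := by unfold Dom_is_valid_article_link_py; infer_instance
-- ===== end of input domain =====

-- B replaces A's loop over eight "/wiki/<NS>:" startswith patterns by extracting the namespace
-- token before the first ':' after "/wiki/" and testing membership in a set (objective: idiomatic).


-- ===== PORT A =====
-- the literal skip_patterns list of A
def skipPatterns : List String :=
  ["/wiki/Special:", "/wiki/File:", "/wiki/Category:", "/wiki/Template:",
   "/wiki/Help:", "/wiki/User:", "/wiki/Talk:", "/wiki/MediaWiki:"]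

-- 'for pattern in skip_patterns: if href.startswith(pattern): return False' then 'return True'
def is_valid_article_link_py (href : String) : Bool :=
  if href.toList.isEmpty then false          -- 'if not href: return False'
  else if !(PySem.Str.startswith href "/wiki/") then false
  else if skipPatterns.any (fun p => PySem.Str.startswith href p) then false
  else true

-- ===== PORT B =====
-- the set literal _SKIP of Source B
def skipSet : PySem.Set String :=
  PySem.Set.ofList ["Special", "File", "Category", "Template", "Help", "User", "Talk", "MediaWiki"]

def is_valid_article_link_py_alt (href : String) : Bool :=
  if !(PySem.Str.startswith href "/wiki/") then false
  else
    let rest := PySem.Str.slice href (some 6) none      -- href[len("/wiki/"):]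
    let i := PySem.Str.find rest ":"                    -- rest.find(":")
    if i == -1 then true
    else !(PySem.Set.contains skipSet (PySem.Str.slice rest none (some i)))  -- rest[:i] not in _SKIP

-- ===== PRECONDITION & SPEC =====
def Spec_is_valid_article_link_py (href : String) (out : Bool) : Prop := out = is_valid_article_link_py_alt href
instance (href : String) (out : Bool) : Decidable (Spec_is_valid_article_link_py href out) := by unfold Spec_is_valid_article_link_py; infer_instance

-- ===== CLAIM (what is proved, stated in full; the proofs are below) =====
def Claim_equal_is_valid_article_link_py : Prop := ∀ (href : String), Dom_is_valid_article_link_py href → Spec_is_valid_article_link_py href (is_valid_article_link_py href)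

-- ===== LEMMAS AND PROOFS =====

-- for a namespace word ns without ':', "ns ++ ':' is a prefix of r" is the same as
-- "r has a colon and ns is exactly the segment before the first colon r.take (find r ':')"
theorem prefix_colon_iff (ns r : List Char) (hns : ':' ∉ ns)
    (hfind : 0 ≤ PySem.Chars.find r [':']) :
    (ns ++ [':'] <+: r) ↔ ns = r.take (PySem.Chars.find r [':']).toNat := by
  obtain ⟨hpre, hmin⟩ := PySem.Chars.find_spec (s := r) (sub := [':']) hfind
  obtain ⟨i, hi⟩ : ∃ i, i = (PySem.Chars.find r [':']).toNat := ⟨_, rfl⟩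
  rw [← hi] at hpre hmin ⊢
  constructor
  · rintro ⟨t, ht⟩
    have hlen : i = ns.length := by
      by_contra hne
      rcases Nat.lt_or_ge i ns.length with hlt | hge
      · -- a colon at i < |ns| would sit inside ns, contradicting hns
        rcases hpre with ⟨u, hu⟩
        have hgi : r[i]? = some ':' := by
          have := congrArg (·[0]?) hu
          simpa [List.getElem?_drop] using this.symm
        rw [← ht, List.append_assoc, List.getElem?_append_left hlt] at hgi
        exact hns (List.mem_of_getElem? hgi)
      · -- i > |ns|: but r.drop |ns| starts with ':' — contradicts minimality
        have hgt : ns.length < i := lt_of_le_of_ne hge (Ne.symm hne)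
        apply hmin ns.length hgt
        refine ⟨t, ?_⟩
        rw [← ht, List.append_assoc, List.drop_left]
    rw [hlen, ← ht, List.append_assoc, List.take_left]
  · intro hns'
    rcases hpre with ⟨u, hu⟩
    refine ⟨u, ?_⟩
    calc ns ++ [':'] ++ u = r.take i ++ ([':'] ++ u) := by rw [hns']; simp
    _ = r.take i ++ r.drop i := by rw [hu]
    _ = r := List.take_append_drop i r

-- A's pattern loop, restated over the suffix r that follows "/wiki/"
theorem any_pattern_iff (href : String) (r : List Char)
    (h : href.toList = "/wiki/".toList ++ r) :
    (skipPatterns.any (fun p => PySem.Str.startswith href p) = true) ↔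
      (∃ ns ∈ ["Special", "File", "Category", "Template", "Help", "User", "Talk", "MediaWiki"],
        ns.toList ++ [':'] <+: r) := by
  have key : ∀ p ns : String, p.toList = "/wiki/".toList ++ (ns.toList ++ [':']) →
      (PySem.Str.startswith href p = true ↔ ns.toList ++ [':'] <+: r) := by
    intro p ns hpl
    rw [PySem.Str.startswith_eq, PySem.Chars.startswith_iff, h, hpl]
    exact List.prefix_append_right_inj "/wiki/".toList
  rw [List.any_eq_true]
  constructor
  · rintro ⟨p, hp, hsw⟩
    fin_cases hp
    · exact ⟨"Special", by simp, (key _ "Special" (by decide)).mp hsw⟩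
    · exact ⟨"File", by simp, (key _ "File" (by decide)).mp hsw⟩
    · exact ⟨"Category", by simp, (key _ "Category" (by decide)).mp hsw⟩
    · exact ⟨"Template", by simp, (key _ "Template" (by decide)).mp hsw⟩
    · exact ⟨"Help", by simp, (key _ "Help" (by decide)).mp hsw⟩
    · exact ⟨"User", by simp, (key _ "User" (by decide)).mp hsw⟩
    · exact ⟨"Talk", by simp, (key _ "Talk" (by decide)).mp hsw⟩
    · exact ⟨"MediaWiki", by simp, (key _ "MediaWiki" (by decide)).mp hsw⟩
  · rintro ⟨ns, hns, hpre⟩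
    fin_cases hns
    · exact ⟨"/wiki/Special:", by simp [skipPatterns], (key _ "Special" (by decide)).mpr hpre⟩
    · exact ⟨"/wiki/File:", by simp [skipPatterns], (key _ "File" (by decide)).mpr hpre⟩
    · exact ⟨"/wiki/Category:", by simp [skipPatterns], (key _ "Category" (by decide)).mpr hpre⟩
    · exact ⟨"/wiki/Template:", by simp [skipPatterns], (key _ "Template" (by decide)).mpr hpre⟩
    · exact ⟨"/wiki/Help:", by simp [skipPatterns], (key _ "Help" (by decide)).mpr hpre⟩
    · exact ⟨"/wiki/User:", by simp [skipPatterns], (key _ "User" (by decide)).mpr hpre⟩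
    · exact ⟨"/wiki/Talk:", by simp [skipPatterns], (key _ "Talk" (by decide)).mpr hpre⟩
    · exact ⟨"/wiki/MediaWiki:", by simp [skipPatterns], (key _ "MediaWiki" (by decide)).mpr hpre⟩

-- ===== VERDICT (by name: the statement is the Claim_ definition above) =====
theorem is_valid_article_link_py_spec : Claim_equal_is_valid_article_link_py := by
  intro href _
  unfold Spec_is_valid_article_link_py is_valid_article_link_py is_valid_article_link_py_alt
  by_cases hsw : PySem.Str.startswith href "/wiki/" = true
  case neg =>
    simp only [Bool.eq_false_iff.mpr hsw, Bool.not_false, if_true, ite_self]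
  case pos =>
    have hpre : "/wiki/".toList <+: href.toList := by
      have := hsw; rw [PySem.Str.startswith_eq, PySem.Chars.startswith_iff] at this; exact this
    rcases hpre with ⟨r, hr⟩
    have hnonempty : href.toList.isEmpty = false := by rw [← hr]; simp
    have hrest : (PySem.Str.slice href (some 6) none).toList = r := by
      simp only [PySem.Str.toList_slice, PySem.Chars.slice_eq_listSlice]
      rw [show ((6:Int) = ((6:Nat):Int)) from rfl, PySem.List.slice_from_natCast, ← hr]
      simp
    have hfind_eq : PySem.Str.find (PySem.Str.slice href (some 6) none) ":" = PySem.Chars.find r [':'] := by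
      rw [PySem.Str.find_eq, hrest, show (":".toList = [':']) from rfl]
    by_cases hcol : PySem.Chars.find r [':'] = -1
    · -- rest has no colon: A's loop matches no pattern, B returns True
      have hnoinfix := (PySem.Chars.find_eq_neg_one_iff _ _).mp hcol
      have hany : skipPatterns.any (fun p => PySem.Str.startswith href p) = false := by
        rw [Bool.eq_false_iff]
        intro h
        rcases (any_pattern_iff href r hr.symm).mp h with ⟨ns, _, hp⟩
        exact hnoinfix ((List.suffix_append ns.toList [':']).isInfix.trans hp.isInfix)
      have hb : (PySem.Str.find (PySem.Str.slice href (some 6) none) ":" == -1) = true := by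
        rw [hfind_eq]; exact beq_iff_eq.mpr hcol
      simp only [hnonempty, Bool.false_eq_true, if_false, hsw, Bool.not_true, hany, hb, if_true]
    · -- rest has a colon at i: pattern match ↔ namespace token ∈ skip set
      have hge : 0 ≤ PySem.Chars.find r [':'] := by
        have := PySem.Chars.neg_one_le_find (s := r) (sub := [':'])
        omega
      have htake : (PySem.Str.slice (PySem.Str.slice href (some 6) none) none (some (PySem.Chars.find r [':']))).toList
          = r.take (PySem.Chars.find r [':']).toNat := by
        simp only [PySem.Str.toList_slice, PySem.Chars.slice_eq_listSlice, hrest]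
        exact PySem.List.slice_to _ hge
      have hanyc : skipPatterns.any (fun p => PySem.Str.startswith href p)
          = PySem.Set.contains skipSet (PySem.Str.slice (PySem.Str.slice href (some 6) none) none (some (PySem.Chars.find r [':']))) := by
        rw [Bool.eq_iff_iff, any_pattern_iff href r hr.symm, PySem.Set.contains_iff]
        unfold skipSet
        rw [PySem.Set.mem_ofList]
        constructor
        · rintro ⟨ns, hns, hp⟩
          have hcolon : (':' : Char) ∉ ns.toList := by
            fin_cases hns <;> decide
          have := (prefix_colon_iff ns.toList r hcolon hge).mp hp
          have heq : PySem.Str.slice (PySem.Str.slice href (some 6) none) none (some (PySem.Chars.find r [':'])) = ns :=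
            String.toList_inj.mp (by rw [htake, ← this])
          rw [heq]; exact hns
        · intro hmem
          refine ⟨_, hmem, ?_⟩
          have hcolon : (':' : Char) ∉ (PySem.Str.slice (PySem.Str.slice href (some 6) none) none (some (PySem.Chars.find r [':']))).toList := by
            rw [htake]
            intro hin
            obtain ⟨j, hj, hjv⟩ := List.mem_iff_getElem.mp hin
            have hjn : j < (PySem.Chars.find r [':']).toNat := by
              have := hj; rw [List.length_take] at this; omega
            have hjr : j < r.length := by
              have := hj; rw [List.length_take] at this; omega
            obtain ⟨_, hmin⟩ := PySem.Chars.find_spec (s := r) (sub := [':']) hge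
            apply hmin j hjn
            refine ⟨r.drop (j+1), ?_⟩
            have hrv : r[j] = ':' := by
              have := hjv
              rwa [List.getElem_take] at this
            rw [List.singleton_append, ← hrv]
            exact (List.drop_eq_getElem_cons hjr).symm
          exact (prefix_colon_iff _ r hcolon hge).mpr htake
      have hb : (PySem.Str.find (PySem.Str.slice href (some 6) none) ":" == -1) = false := by
        rw [hfind_eq]; simpa using hcol
      simp only [hnonempty, Bool.false_eq_true, if_false, hsw, Bool.not_true, hb, hanyc]
      rw [hfind_eq]
      cases hc : skipSet.contains (PySem.Str.slice (PySem.Str.slice href (some 6) none) none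
          (some (PySem.Chars.find r [':']))) <;> simp
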